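-- pv_equiv track=rewrite | github.com/mike10004/adventofcode2017 | advent04/count_valid_passphrases.py | to_multiset
-- ===== SOURCE A (Python) =====
-- def to_multiset(token):
--     """ Creates a multiset from a string. A multiset is a set of tuples (c, n) where c is a character and n is a count of that character in the string."""
--     counts = {}
--     for ch in token:
--         try:
--             count = counts[ch]
--         except KeyError:
--             count = 0
--         counts[ch] = count + 1
--     multiset = set()
--     for ch in counts:
--         multiset.add((ch, counts[ch]))
--     return frozenset(multiset)
-- ===== SOURCE B (Python) =====
-- def to_multiset(token):
--     """Sort the characters, then scan the sorted list grouping runs of equal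
--     characters; each run yields one (char, run_length) pair."""
--     chars = sorted(token)
--     pairs = []
--     while chars:
--         ch = chars[0]
--         run = 1
--         while run < len(chars) and chars[run] == ch:
--             run += 1
--         pairs.append((ch, run))
--         chars = chars[run:]
--     return frozenset(pairs)
-- ===== Notes on version B (the rewrite author's own statement) =====
-- stated objective: alternative
-- what changed: Replaces A's hash-dict character tally plus set-building second pass with a comparison sort of the characters followed by a single run-grouping scan of the sorted list.
import Mathlib
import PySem

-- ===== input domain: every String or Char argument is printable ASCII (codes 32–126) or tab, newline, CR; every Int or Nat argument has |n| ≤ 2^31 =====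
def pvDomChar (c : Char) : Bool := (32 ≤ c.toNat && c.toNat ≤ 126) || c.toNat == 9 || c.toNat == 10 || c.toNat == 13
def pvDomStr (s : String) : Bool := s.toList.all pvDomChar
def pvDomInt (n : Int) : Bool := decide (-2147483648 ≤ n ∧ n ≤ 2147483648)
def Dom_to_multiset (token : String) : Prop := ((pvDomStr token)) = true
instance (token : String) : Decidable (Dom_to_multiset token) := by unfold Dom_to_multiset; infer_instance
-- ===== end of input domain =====

-- B replaces A's hash-dict tally plus second set-building pass by sorting the characters and
-- grouping runs of equal characters in one scan; objective: alternative (not faster).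
-- Python's frozenset has no specified iteration order, so both ports represent the returned
-- frozenset canonically as its pair list sorted by the (distinct) first component.

-- ===== PORT A =====
def to_multiset (token : String) : List (String × Int) :=
  -- 'count = counts[ch]' with 'except KeyError: count = 0' is exactly getD … 0
  let counts : PySem.Dict String Int :=
    token.toList.foldl (fun d c => d.insert c.toString (d.getD c.toString 0 + 1)) PySem.Dict.empty
  -- 'for ch in counts: multiset.add((ch, counts[ch]))'; ch is a key of counts, so counts[ch] = getD ch 0
  let multiset : PySem.Set (String × Int) :=
    counts.keys.foldl (fun s ch => PySem.Set.add s (ch, counts.getD ch 0)) PySem.Set.empty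
  PySem.List.sorted multiset (fun p => p.1) false

-- ===== PORT B =====
-- the outer while loop of Source B: take the run of the first character, emit (ch, run), continue after it
def runsB (chars : List Char) : List (String × Int) :=
  match chars with
  | [] => []
  | c :: rest =>
    (c.toString, (1 + (rest.takeWhile (fun x => x == c)).length : Int))
      :: runsB (rest.dropWhile (fun x => x == c))
termination_by chars.length
decreasing_by
  simpa using Nat.lt_succ_of_le (List.Sublist.length_le (List.dropWhile_sublist _))

def to_multiset_alt (token : String) : List (String × Int) :=
  let pairs := runsB (PySem.List.sorted token.toList (fun c => c) false)
  PySem.List.sorted (PySem.Set.ofList pairs) (fun p => p.1) false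

-- ===== PRECONDITION & SPEC =====
def Spec_to_multiset (token : String) (out : List (String × Int)) : Prop := out = to_multiset_alt token
instance (token : String) (out : List (String × Int)) : Decidable (Spec_to_multiset token out) := by unfold Spec_to_multiset; infer_instance

-- ===== CLAIM (what is proved, stated in full; the proofs are below) =====
def Claim_equal_to_multiset : Prop := ∀ (token : String), Dom_to_multiset token → Spec_to_multiset token (to_multiset token)

-- ===== LEMMAS AND PROOFS =====

lemma foldl_add_absorb {α : Type} [BEq α] [LawfulBEq α] (t : List α) (s : PySem.Set α)
    (hx : ∀ x ∈ t, x ∈ s) : t.foldl PySem.Set.add s = s := by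
  induction t with
  | nil => rfl
  | cons x t ih =>
    have h1 : PySem.Set.add s x = s := by
      simp [PySem.Set.add, PySem.Set.contains, hx x (by simp)]
    simp only [List.foldl_cons, h1]
    exact ih (fun y hy => hx y (by simp [hy]))

lemma foldl_add_cons {α : Type} [BEq α] [LawfulBEq α] (xs : List α) (c : α) (s : PySem.Set α)
    (hc : c ∉ xs) : xs.foldl PySem.Set.add (c :: s) = c :: xs.foldl PySem.Set.add s := by
  induction xs generalizing s with
  | nil => rfl
  | cons x xs ih =>
    have hxc : x ≠ c := fun h => hc (by simp [h])
    have hc' : c ∉ xs := fun h => hc (by simp [h])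
    have h1 : PySem.Set.add (c :: s) x =
        if s.contains x then c :: s else c :: (s ++ [x]) := by
      simp [PySem.Set.add, PySem.Set.contains, hxc]
    simp only [List.foldl_cons]
    by_cases h : PySem.Set.contains s x = true
    · rw [h1, if_pos h, show PySem.Set.add s x = s from by unfold PySem.Set.add; rw [if_pos h]]
      exact ih _ hc'
    · rw [h1, if_neg h, show PySem.Set.add s x = s ++ [x] from by unfold PySem.Set.add; rw [if_neg h]]
      exact ih _ hc'

lemma foldl_add_sublist {α : Type} [BEq α] (xs : List α) (s : PySem.Set α) :
    ∃ t, xs.foldl PySem.Set.add s = s ++ t ∧ t.Sublist xs := by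
  induction xs generalizing s with
  | nil => exact ⟨[], by simp, List.Sublist.refl _⟩
  | cons x xs ih =>
    simp only [List.foldl_cons]
    by_cases h : PySem.Set.contains s x = true
    · rw [show PySem.Set.add s x = s from by unfold PySem.Set.add; rw [if_pos h]]
      obtain ⟨t, ht, hs⟩ := ih s
      exact ⟨t, ht, hs.cons _⟩
    · rw [show PySem.Set.add s x = s ++ [x] from by unfold PySem.Set.add; rw [if_neg h]]
      obtain ⟨t, ht, hs⟩ := ih (s ++ [x])
      exact ⟨x :: t, by simp [ht], hs.cons₂ _⟩

lemma ofList_sublist {α : Type} [BEq α] (xs : List α) :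
    (PySem.Set.ofList xs).Sublist xs := by
  obtain ⟨t, ht, hs⟩ := foldl_add_sublist xs []
  simpa [PySem.Set.ofList_eq_foldl, ht] using hs

lemma ofList_map {α β : Type} [BEq α] [LawfulBEq α] [BEq β] [LawfulBEq β]
    (f : α → β) (hf : Function.Injective f) (xs : List α) :
    PySem.Set.ofList (xs.map f) = (PySem.Set.ofList xs).map f := by
  have key : ∀ (s : PySem.Set α),
      (xs.map f).foldl PySem.Set.add (s.map f) = (xs.foldl PySem.Set.add s).map f := by
    induction xs with
    | nil => intro s; rfl
    | cons x xs ih =>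
      intro s
      have hadd : PySem.Set.add (s.map f) (f x) = (PySem.Set.add s x).map f := by
        by_cases h : x ∈ s
        · simp only [PySem.Set.add, PySem.Set.contains]
          rw [if_pos, if_pos] <;> simp [h]
          exact ⟨x, h, rfl⟩
        · simp only [PySem.Set.add, PySem.Set.contains]
          rw [if_neg, if_neg] <;> simp [h]
          exact fun y hy hxy => h ((hf hxy) ▸ hy)
      simpa [hadd] using ih (PySem.Set.add s x)
  simpa using key []

lemma charToStr_lt {a b : Char} (h : a < b) : a.toString < b.toString := by
  simp only [String.lt_iff_toList_lt, Char.toString, String.toList_singleton]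
  exact List.Lex.rel h

lemma charToStr_inj : Function.Injective Char.toString := by
  intro a b h
  have := congrArg String.toList h
  simpa [Char.toString] using this

lemma runsB_eq (l : List Char) :
    l.Pairwise (· ≤ ·) →
    runsB l = (PySem.Set.ofList l).map (fun c => (c.toString, (l.count c : Int))) := by
  induction l using runsB.induct with
  | case1 => intro _; simp [runsB]
  | case2 c rest ih =>
    intro h
    obtain ⟨hle, hpr⟩ := List.pairwise_cons.mp h
    have hrest : rest.takeWhile (fun x => x == c) ++ rest.dropWhile (fun x => x == c) = rest :=
      List.takeWhile_append_dropWhile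
    have hct : ∀ x ∈ rest.takeWhile (fun x => x == c), x = c := by
      intro x hx
      simpa using List.mem_takeWhile_imp hx
    have hpd : (rest.dropWhile (fun x => x == c)).Pairwise (· ≤ ·) :=
      hpr.sublist (List.dropWhile_sublist _)
    have hcd : ∀ x ∈ rest.dropWhile (fun x => x == c), c < x := by
      cases hdrop : rest.dropWhile (fun x => x == c) with
      | nil => intro x hx; simp at hx
      | cons e d' =>
        intro x hx
        have h1 := List.head?_dropWhile_not (fun x => x == c) rest
        rw [hdrop] at h1
        simp only [List.head?_cons] at h1
        have hpd' := hpd; rw [hdrop] at hpd'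
        have hce : c < e := by
          have hmem : e ∈ rest := by rw [← hrest, hdrop]; simp
          rcases lt_or_eq_of_le (hle e hmem) with h2 | h2
          · exact h2
          · rw [← h2] at h1; simp at h1
        rcases List.mem_cons.mp hx with rfl | hx'
        · exact hce
        · exact lt_of_lt_of_le hce ((List.pairwise_cons.mp hpd').1 x hx')
    have hnotmem : c ∉ rest.dropWhile (fun x => x == c) := fun hm => lt_irrefl c (hcd c hm)
    have hof : PySem.Set.ofList (c :: rest) =
        c :: PySem.Set.ofList (rest.dropWhile (fun x => x == c)) := by
      conv_lhs => rw [PySem.Set.ofList_eq_foldl, ← hrest]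
      simp only [List.foldl_cons, List.foldl_append]
      rw [show PySem.Set.add [] c = [c] from rfl,
          foldl_add_absorb _ [c] (fun x hx => by simp [hct x hx]),
          show ([c] : PySem.Set Char) = c :: ([] : PySem.Set Char) from rfl,
          foldl_add_cons _ _ _ hnotmem, ← PySem.Set.ofList_eq_foldl]
    have hcount : (List.count c (c :: rest) : Int)
        = 1 + ((rest.takeWhile (fun x => x == c)).length : Int) := by
      have h1 : List.count c (rest.takeWhile (fun x => x == c))
          = (rest.takeWhile (fun x => x == c)).length :=
        List.count_eq_length.mpr (fun b hb => (hct b hb).symm)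
      have h2 : List.count c (rest.dropWhile (fun x => x == c)) = 0 :=
        List.count_eq_zero.mpr hnotmem
      have h3 : List.count c rest = (rest.takeWhile (fun x => x == c)).length := by
        conv_lhs => rw [← hrest]
        rw [List.count_append, h1, h2]
        omega
      rw [List.count_cons, h3]
      push_cast
      simp
      ring
    rw [runsB, hof, List.map_cons]
    congr 1
    · exact congrArg _ hcount.symm
    · rw [ih hpd]
      apply List.map_congr_left
      intro x hx
      have hxd : x ∈ rest.dropWhile (fun y => y == c) := (PySem.Set.mem_ofList _ _).mp hx
      have hxc : x ≠ c := fun h0 => lt_irrefl c (h0 ▸ hcd x hxd)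
      have hxt : List.count x (rest.takeWhile (fun y => y == c)) = 0 :=
        List.count_eq_zero.mpr (fun hm => hxc (hct x hm))
      have hcx : (c == x) = false := by simp [Ne.symm hxc]
      have : List.count x (c :: rest) = List.count x (rest.dropWhile (fun y => y == c)) := by
        conv_lhs => rw [← hrest]
        rw [List.count_cons, List.count_append, hxt, hcx]
        simp
      rw [this]

lemma main_eq (token : String) : to_multiset token = to_multiset_alt token := by
  have hstrinj : Function.Injective Char.toString := charToStr_inj
  -- canonical list L
  have hDlt := PySem.List.sorted_ofList_pairwise_lt (token.toList)
  have hLpair : (((PySem.List.sorted (PySem.Set.ofList token.toList) (fun c => c) false)).map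
      (fun c => (c.toString, (token.toList.count c : Int)))).Pairwise
      (fun a b => a.1 < b.1) := by
    rw [List.pairwise_map]
    exact hDlt.imp (fun h => charToStr_lt h)
  -- ===== A side =====
  have hcounter : token.toList.foldl
      (fun d c => d.insert c.toString (d.getD c.toString 0 + 1)) PySem.Dict.empty
      = PySem.Dict.counter (token.toList.map Char.toString) := by
    rw [← PySem.Dict.foldl_insert_getD_add_one_eq_counter, List.foldl_map]
  have hA : to_multiset token
      = PySem.List.sorted ((PySem.Set.ofList (token.toList.map Char.toString)).map
          (fun k => (k, ((token.toList.map Char.toString).count k : Int)))) (fun p => p.1) false := by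
    unfold to_multiset
    simp only []
    congr 1
    rw [hcounter,
        ← PySem.Set.update_map_eq_foldl_add _ (fun ch => (ch, (PySem.Dict.counter (token.toList.map Char.toString)).getD ch 0)) PySem.Set.empty,
        PySem.Set.update_empty, PySem.Dict.keys_counter]
    rw [List.map_congr_left (fun k _ => by rw [PySem.Dict.getD_counter])]
    apply PySem.Set.ofList_eq_self_of_nodup
    exact (PySem.Set.nodup_ofList _).map (fun a b hab => (Prod.mk.injEq _ _ _ _).mp hab |>.1)
  -- A's sorted set equals L
  have hMperm : (((PySem.List.sorted (PySem.Set.ofList token.toList) (fun c => c) false)).map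
        (fun c => (c.toString, (token.toList.count c : Int)))).Perm
      ((PySem.Set.ofList (token.toList.map Char.toString)).map
        (fun k => (k, ((token.toList.map Char.toString).count k : Int)))) := by
    have h1 : ((PySem.List.sorted (PySem.Set.ofList token.toList) (fun c => c) false)).map
        (fun c => (c.toString, (token.toList.count c : Int)))
        = (((PySem.List.sorted (PySem.Set.ofList token.toList) (fun c => c) false)).map Char.toString).map
          (fun k => (k, ((token.toList.map Char.toString).count k : Int))) := by
      rw [List.map_map]
      apply List.map_congr_left
      intro c _
      simp only [Function.comp]
      rw [List.count_map_of_injective _ _ hstrinj]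
    rw [h1, ofList_map _ hstrinj]
    exact ((PySem.List.sorted_perm _ _ _).map Char.toString).map _
  have hAL : to_multiset token
      = ((PySem.List.sorted (PySem.Set.ofList token.toList) (fun c => c) false)).map
          (fun c => (c.toString, (token.toList.count c : Int))) := by
    rw [hA]
    exact PySem.List.sorted_eq_of_perm_of_pairwise_lt _ _ _ hMperm hLpair
  -- ===== B side =====
  have hsl : (PySem.List.sorted token.toList (fun c => c) false).Pairwise (· ≤ ·) :=
    PySem.List.sorted_pairwise token.toList (fun c => c)
  have hofl : PySem.List.sorted (PySem.Set.ofList token.toList) (fun c => c) false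
      = PySem.Set.ofList (PySem.List.sorted token.toList (fun c => c) false) := by
    apply PySem.List.sorted_eq_of_perm_of_pairwise_lt
    · rw [List.perm_ext_iff_of_nodup (PySem.Set.nodup_ofList _) (PySem.Set.nodup_ofList _)]
      intro a
      rw [PySem.Set.mem_ofList, PySem.Set.mem_ofList, PySem.List.mem_sorted]
    · have hle := hsl.sublist (ofList_sublist (PySem.List.sorted token.toList (fun c => c) false))
      have hne : (PySem.Set.ofList (PySem.List.sorted token.toList (fun c => c) false)).Pairwise (· ≠ ·) :=
        PySem.Set.nodup_ofList _
      exact (hle.and hne).imp (fun h => lt_of_le_of_ne h.1 h.2)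
  have hBL : runsB (PySem.List.sorted token.toList (fun c => c) false)
      = ((PySem.List.sorted (PySem.Set.ofList token.toList) (fun c => c) false)).map
          (fun c => (c.toString, (token.toList.count c : Int))) := by
    rw [runsB_eq _ hsl, hofl]
    apply List.map_congr_left
    intro c _
    rw [(PySem.List.sorted_perm token.toList (fun c => c) false).count_eq]
  have hB : to_multiset_alt token
      = ((PySem.List.sorted (PySem.Set.ofList token.toList) (fun c => c) false)).map
          (fun c => (c.toString, (token.toList.count c : Int))) := by
    unfold to_multiset_alt
    simp only []
    rw [hBL, PySem.Set.ofList_eq_self_of_nodup _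
        (List.Pairwise.imp (fun h => fun he => absurd (congrArg Prod.fst he) (ne_of_lt h)) hLpair),
      PySem.List.sorted_eq_self_of_pairwise _ _ (hLpair.imp le_of_lt)]
  rw [hAL, hB]

-- ===== VERDICT (by name: the statement is the Claim_ definition above) =====
theorem to_multiset_spec : Claim_equal_to_multiset := by
  intro token _
  unfold Spec_to_multiset
  exact main_eq token
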